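-- pv_equiv track=rewrite | github.com/whyohane/estudos | w3resource/list exercises/exercise4.py | vowels_check
-- ===== SOURCE A (Python) =====
-- def vowels_check(word):
--
--     vowels = 'aeiouAEIOU'
--     count = 0
--
--     for vowel in vowels:
--         count += word.count(vowel)
--
--     if count == 2:
--         return True
--
--     return False
-- ===== SOURCE B (Python) =====
-- def vowels_check(word):
--     count = 0
--     for ch in word:
--         if ch in 'aeiouAEIOU':
--             count += 1
--     return count == 2
-- ===== Notes on version B (the rewrite author's own statement) =====
-- stated objective: idiomatic
-- what changed: B makes a single pass over the word incrementing a counter on vowel characters, instead of A's ten full scans of the word (one word.count call per vowel); algorithmically one pass vs ten, though A's C-level str.count makes A faster in CPython.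
import Mathlib
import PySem

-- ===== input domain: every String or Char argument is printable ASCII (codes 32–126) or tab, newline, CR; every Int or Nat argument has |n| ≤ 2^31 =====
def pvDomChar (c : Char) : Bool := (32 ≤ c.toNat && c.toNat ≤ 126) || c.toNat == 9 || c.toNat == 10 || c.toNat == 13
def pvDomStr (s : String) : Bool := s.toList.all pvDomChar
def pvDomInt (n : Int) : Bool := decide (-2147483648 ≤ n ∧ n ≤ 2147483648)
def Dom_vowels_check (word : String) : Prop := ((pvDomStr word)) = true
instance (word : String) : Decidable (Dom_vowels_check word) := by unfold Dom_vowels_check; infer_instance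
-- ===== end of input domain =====

-- B replaces A's ten full scans of the word (one word.count per vowel) with a single pass counting vowel characters.

-- ===== PORT A =====
-- for vowel in 'aeiouAEIOU': count += word.count(vowel); return count == 2
def vowels_check (word : String) : Bool :=
  let vowels : String := "aeiouAEIOU"
  let count : Int :=
    vowels.toList.foldl (fun acc vowel => acc + (PySem.Str.count word (String.ofList [vowel]) : Int)) 0
  if count = 2 then true else false

-- ===== PORT B =====
-- single pass: count = 0; for ch in word: if ch in 'aeiouAEIOU': count += 1; return count == 2
def vowels_check_alt (word : String) : Bool :=
  let count : Int :=
    word.toList.foldl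
      (fun acc ch => if PySem.Str.isIn (String.ofList [ch]) "aeiouAEIOU" then acc + 1 else acc) 0
  count == 2

-- ===== PRECONDITION & SPEC =====
def Spec_vowels_check (word : String) (out : Bool) : Prop := out = vowels_check_alt word
instance (word : String) (out : Bool) : Decidable (Spec_vowels_check word out) := by unfold Spec_vowels_check; infer_instance

-- ===== CLAIM (what is proved, stated in full; the proofs are below) =====
def Claim_equal_vowels_check : Prop := ∀ (word : String), Dom_vowels_check word → Spec_vowels_check word (vowels_check word)

-- ===== LEMMAS AND PROOFS =====

-- s.count(c) for a single-character needle is the character count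
theorem chars_count_go_singleton (c : Char) :
    ∀ (fuel : Nat) (l : List Char) (acc : Nat), l.length ≤ fuel →
      PySem.Chars.count.go [c] fuel l acc = acc + l.count c := by
  intro fuel
  induction fuel with
  | zero =>
    intro l acc h
    have : l = [] := List.length_eq_zero_iff.mp (Nat.le_zero.mp h)
    subst this; simp [PySem.Chars.count.go]
  | succ n ih =>
    intro l acc h
    cases l with
    | nil => simp [PySem.Chars.count.go]
    | cons hd t =>
      simp only [PySem.Chars.count.go]
      by_cases hc : hd = c
      · subst hc
        have hpre : [hd].isPrefixOf (hd :: t) = true := by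
          simp [List.isPrefixOf]
        rw [if_pos hpre]
        simp only [List.length, List.drop]
        rw [ih _ _ (by simpa using Nat.le_of_succ_le_succ h)]
        simp
        omega
      · have hbe : (c == hd) = false := by simp [Ne.symm hc]
        have hpre : [c].isPrefixOf (hd :: t) = false := by
          simp [List.isPrefixOf, hbe]
        rw [if_neg (by simp [hpre])]
        rw [ih _ _ (Nat.le_of_succ_le_succ h)]
        simp [List.count_cons]
        exact hc

theorem str_count_singleton (word : String) (c : Char) :
    PySem.Str.count word (String.ofList [c]) = word.toList.count c := by
  rw [PySem.Str.count_eq]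
  simp only [String.toList_ofList]
  unfold PySem.Chars.count
  simp only [List.isEmpty_cons, if_false, Bool.false_eq_true]
  simpa using chars_count_go_singleton c _ _ 0 (Nat.le_refl _)

-- ch in s for a single-character ch is list membership
theorem isIn_singleton (c : Char) (s : String) :
    PySem.Str.isIn (String.ofList [c]) s = decide (c ∈ s.toList) := by
  have h : PySem.Chars.isIn [c] s.toList = true ↔ c ∈ s.toList := by
    rw [PySem.Chars.isIn_iff_infix]
    constructor
    · intro hinf
      exact hinf.subset (by simp)
    · intro hm
      obtain ⟨l1, l2, hsp⟩ := List.append_of_mem hm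
      exact ⟨l1, l2, by rw [hsp]; simp⟩
  rw [PySem.Str.isIn_eq]
  simp only [String.toList_ofList]
  by_cases hm : c ∈ s.toList
  · simp [hm, h.mpr hm]
  · simp only [hm, decide_false]
    exact Bool.eq_false_iff.mpr (fun hx => hm (h.mp hx))

-- sum over a nodup vowel list of (c == v) indicators is a membership indicator
theorem sum_ite_mem (c : Char) : ∀ (V : List Char), V.Nodup →
    (V.map (fun v => if (c == v) = true then (1 : Int) else 0)).sum
      = if c ∈ V then 1 else 0 := by
  intro V
  induction V with
  | nil => simp
  | cons v V ih =>
    intro hV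
    obtain ⟨hv, hV'⟩ := List.nodup_cons.mp hV
    rw [List.map_cons, List.sum_cons, ih hV']
    by_cases h : c = v
    · subst h
      simp [hv]
    · have hbe : (c == v) = false := by simp [h]
      simp [hbe, h]

-- sum over a nodup list of per-element counts = countP of membership
theorem sum_counts (V : List Char) (hV : V.Nodup) (l : List Char) :
    (V.map (fun v => (l.count v : Int))).sum = (l.countP (fun c => decide (c ∈ V)) : Int) := by
  induction l with
  | nil => simp
  | cons c t ih =>
    simp only [List.count_cons, List.countP_cons]
    push_cast
    rw [List.sum_map_add, ih, sum_ite_mem c V hV]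
    by_cases hm : c ∈ V <;> simp [hm]

-- ===== VERDICT (by name: the statement is the Claim_ definition above) =====
theorem vowels_check_spec : Claim_equal_vowels_check := by
  intro word _
  unfold Spec_vowels_check vowels_check vowels_check_alt
  simp only []
  rw [PySem.List.foldl_ite_add_one
      (p := fun ch => PySem.Str.isIn (String.ofList [ch]) "aeiouAEIOU" = true)]
  rw [PySem.List.foldl_add]
  simp only [str_count_singleton, isIn_singleton]
  rw [sum_counts "aeiouAEIOU".toList (by decide) word.toList]
  simp [Bool.beq_eq_decide_eq]
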